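-- pv_equiv track=rewrite | github.com/roymamon/Camellia_in_CBC | camellia/f_function.py | p_function
-- ===== SOURCE A (Python) =====
-- def p_function(sboxed_bytes: list[int]) -> int:
--     y = [0] * 8
--     y[0] = sboxed_bytes[0] ^ sboxed_bytes[2] ^ sboxed_bytes[3] ^ sboxed_bytes[5] ^ sboxed_bytes[6] ^ sboxed_bytes[7]
--     y[1] = sboxed_bytes[0] ^ sboxed_bytes[1] ^ sboxed_bytes[3] ^ sboxed_bytes[4] ^ sboxed_bytes[6] ^ sboxed_bytes[7]
--     y[2] = sboxed_bytes[0] ^ sboxed_bytes[1] ^ sboxed_bytes[2] ^ sboxed_bytes[4] ^ sboxed_bytes[5] ^ sboxed_bytes[7]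
--     y[3] = sboxed_bytes[1] ^ sboxed_bytes[2] ^ sboxed_bytes[3] ^ sboxed_bytes[4] ^ sboxed_bytes[5] ^ sboxed_bytes[6]
--     y[4] = sboxed_bytes[0] ^ sboxed_bytes[1] ^ sboxed_bytes[5] ^ sboxed_bytes[6] ^ sboxed_bytes[7]
--     y[5] = sboxed_bytes[1] ^ sboxed_bytes[2] ^ sboxed_bytes[4] ^ sboxed_bytes[6] ^ sboxed_bytes[7]
--     y[6] = sboxed_bytes[2] ^ sboxed_bytes[3] ^ sboxed_bytes[4] ^ sboxed_bytes[5] ^ sboxed_bytes[7]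
--     y[7] = sboxed_bytes[0] ^ sboxed_bytes[3] ^ sboxed_bytes[4] ^ sboxed_bytes[5] ^ sboxed_bytes[6]
--
--     result = 0
--     for byte in y:
--         result = (result << 8) | byte
--     return result
-- ===== SOURCE B (Python) =====
-- def p_function(sboxed_bytes: list[int]) -> int:
--     # Simpler decomposition: XOR all eight bytes once into s, then each output
--     # byte is s with the two or three absent input bytes XORed back out.
--     z0, z1, z2, z3, z4, z5, z6, z7 = sboxed_bytes[:8]
--     s = z0 ^ z1 ^ z2 ^ z3 ^ z4 ^ z5 ^ z6 ^ z7
--     result = 0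
--     for absent in ((z1, z4), (z2, z5), (z3, z6), (z0, z7),
--                    (z2, z3, z4), (z0, z3, z5), (z0, z1, z6), (z1, z2, z7)):
--         y = s
--         for b in absent:
--             y ^= b
--         result = (result << 8) | y
--     return result
-- ===== Notes on version B (the rewrite author's own statement) =====
-- stated objective: simpler
-- what changed: B computes the XOR of all eight bytes once and derives each output byte by XORing back the few absent inputs (via a data-driven loop over absence lists), instead of A's eight independent hand-written six/five-term XOR chains.
import Mathlib
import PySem

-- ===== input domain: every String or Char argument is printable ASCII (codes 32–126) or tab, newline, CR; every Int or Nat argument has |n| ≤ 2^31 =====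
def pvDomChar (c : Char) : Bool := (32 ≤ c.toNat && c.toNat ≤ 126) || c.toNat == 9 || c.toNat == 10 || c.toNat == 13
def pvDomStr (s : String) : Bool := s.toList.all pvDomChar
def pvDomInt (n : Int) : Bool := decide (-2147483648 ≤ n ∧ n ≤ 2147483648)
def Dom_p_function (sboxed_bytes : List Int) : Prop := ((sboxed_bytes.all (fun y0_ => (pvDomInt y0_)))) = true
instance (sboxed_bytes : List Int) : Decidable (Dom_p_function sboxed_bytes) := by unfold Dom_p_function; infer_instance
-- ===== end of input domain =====

-- B replaces A's eight hand-written XOR chains by one shared total XOR s plus per-output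
-- corrections (simpler, fewer XORs); equal return value on all lists of length ≥ 8.

-- ===== PORT A =====
-- Indexing uses pyGetD with default 0; the IndexError inputs (length < 8) are excluded by Pre_.
def p_function (sboxed_bytes : List Int) : Int :=
  let g := fun (i : Int) => PySem.List.pyGetD sboxed_bytes i 0
  let y0 := PySem.Int.bxor (PySem.Int.bxor (PySem.Int.bxor (PySem.Int.bxor (PySem.Int.bxor (g 0) (g 2)) (g 3)) (g 5)) (g 6)) (g 7)
  let y1 := PySem.Int.bxor (PySem.Int.bxor (PySem.Int.bxor (PySem.Int.bxor (PySem.Int.bxor (g 0) (g 1)) (g 3)) (g 4)) (g 6)) (g 7)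
  let y2 := PySem.Int.bxor (PySem.Int.bxor (PySem.Int.bxor (PySem.Int.bxor (PySem.Int.bxor (g 0) (g 1)) (g 2)) (g 4)) (g 5)) (g 7)
  let y3 := PySem.Int.bxor (PySem.Int.bxor (PySem.Int.bxor (PySem.Int.bxor (PySem.Int.bxor (g 1) (g 2)) (g 3)) (g 4)) (g 5)) (g 6)
  let y4 := PySem.Int.bxor (PySem.Int.bxor (PySem.Int.bxor (PySem.Int.bxor (g 0) (g 1)) (g 5)) (g 6)) (g 7)
  let y5 := PySem.Int.bxor (PySem.Int.bxor (PySem.Int.bxor (PySem.Int.bxor (g 1) (g 2)) (g 4)) (g 6)) (g 7)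
  let y6 := PySem.Int.bxor (PySem.Int.bxor (PySem.Int.bxor (PySem.Int.bxor (g 2) (g 3)) (g 4)) (g 5)) (g 7)
  let y7 := PySem.Int.bxor (PySem.Int.bxor (PySem.Int.bxor (PySem.Int.bxor (g 0) (g 3)) (g 4)) (g 5)) (g 6)
  [y0, y1, y2, y3, y4, y5, y6, y7].foldl (fun result byte => PySem.Int.bor (result <<< (8 : Nat)) byte) 0

-- ===== PORT B =====
-- Unpacking sboxed_bytes[:8] fails (Python ValueError) on length < 8: excluded by Pre_.
def p_function_alt (sboxed_bytes : List Int) : Int :=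
  match PySem.List.slice sboxed_bytes none (some 8) with
  | [z0, z1, z2, z3, z4, z5, z6, z7] =>
    let s := PySem.Int.bxor (PySem.Int.bxor (PySem.Int.bxor (PySem.Int.bxor (PySem.Int.bxor (PySem.Int.bxor (PySem.Int.bxor z0 z1) z2) z3) z4) z5) z6) z7
    let absents : List (List Int) :=
      [[z1, z4], [z2, z5], [z3, z6], [z0, z7],
       [z2, z3, z4], [z0, z3, z5], [z0, z1, z6], [z1, z2, z7]]
    absents.foldl (fun result absent =>
      PySem.Int.bor (result <<< (8 : Nat)) (absent.foldl PySem.Int.bxor s)) 0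
  | _ => 0

-- ===== PRECONDITION & SPEC =====
-- Pre_: A reads indices 0..7, so it raises IndexError on lists shorter than 8.
def Pre_p_function (sboxed_bytes : List Int) : Prop := 8 ≤ sboxed_bytes.length
instance (sboxed_bytes : List Int) : Decidable (Pre_p_function sboxed_bytes) := by unfold Pre_p_function; infer_instance
def pvWitness_p_function : List Int := [1, 2, 3, 4, 5, 6, 7, 8]

def Spec_p_function (sboxed_bytes : List Int) (out : Int) : Prop := out = p_function_alt sboxed_bytes
instance (sboxed_bytes : List Int) (out : Int) : Decidable (Spec_p_function sboxed_bytes out) := by unfold Spec_p_function; infer_instance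

-- ===== CLAIM =====
def Claim_equal_p_function : Prop := ∀ (sboxed_bytes : List Int), Dom_p_function sboxed_bytes → Pre_p_function sboxed_bytes → Spec_p_function sboxed_bytes (p_function sboxed_bytes)

-- ===== LEMMAS AND PROOFS =====
theorem bxor_oo (m n : Nat) : PySem.Int.bxor (m : Int) (n : Int) = ((m ^^^ n : Nat) : Int) := by
  simp [PySem.Int.bxor]
theorem bxor_on (m n : Nat) : PySem.Int.bxor (m : Int) (Int.negSucc n) = Int.negSucc (m ^^^ n) := by
  simp [PySem.Int.bxor, Int.negSucc_eq]
  split_ifs <;> omega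
theorem bxor_no (m n : Nat) : PySem.Int.bxor (Int.negSucc m) (n : Int) = Int.negSucc (m ^^^ n) := by
  simp [PySem.Int.bxor, Int.negSucc_eq]
  split_ifs <;> omega
theorem bxor_nn (m n : Nat) : PySem.Int.bxor (Int.negSucc m) (Int.negSucc n) = ((m ^^^ n : Nat) : Int) := by
  simp [PySem.Int.bxor, Int.negSucc_eq]
  split_ifs <;> first | rfl | (exfalso; omega)
theorem bxor_assoc (a b c : Int) : PySem.Int.bxor (PySem.Int.bxor a b) c = PySem.Int.bxor a (PySem.Int.bxor b c) := by
  rcases a with a | a <;> rcases b with b | b <;> rcases c with c | c <;>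
    simp only [Int.ofNat_eq_natCast, bxor_oo, bxor_on, bxor_no, bxor_nn, Nat.xor_assoc]
theorem bxor_left_comm (a b c : Int) : PySem.Int.bxor a (PySem.Int.bxor b c) = PySem.Int.bxor b (PySem.Int.bxor a c) := by
  rw [← bxor_assoc, PySem.Int.bxor_comm a b, bxor_assoc]
theorem bxor_cancel_left (a b : Int) : PySem.Int.bxor a (PySem.Int.bxor a b) = b := by
  rw [← bxor_assoc, PySem.Int.bxor_self, PySem.Int.bxor_comm, PySem.Int.bxor_zero]

set_option maxHeartbeats 2000000 in
-- ===== VERDICT =====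
theorem p_function_spec : Claim_equal_p_function := by
  intro xs _ hpre
  unfold Pre_p_function at hpre
  obtain ⟨z0, z1, z2, z3, z4, z5, z6, z7, rest, rfl⟩ :
      ∃ a b c d e f g h rest, xs = a :: b :: c :: d :: e :: f :: g :: h :: rest := by
    match xs, hpre with
    | a :: b :: c :: d :: e :: f :: g :: h :: rest, _ =>
      exact ⟨a, b, c, d, e, f, g, h, rest, rfl⟩
  unfold Spec_p_function p_function p_function_alt
  simp only [show (0:Int) = ((0:Nat):Int) by norm_num, show (1:Int) = ((1:Nat):Int) by norm_num,
    show (2:Int) = ((2:Nat):Int) by norm_num, show (3:Int) = ((3:Nat):Int) by norm_num,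
    show (4:Int) = ((4:Nat):Int) by norm_num, show (5:Int) = ((5:Nat):Int) by norm_num,
    show (6:Int) = ((6:Nat):Int) by norm_num, show (7:Int) = ((7:Nat):Int) by norm_num,
    show (8:Int) = ((8:Nat):Int) by norm_num,
    PySem.List.pyGetD_natCast, PySem.List.slice_to_natCast]
  norm_num [List.getD_eq_getElem?_getD, List.getElem?_cons, List.take_succ_cons, List.take_zero, List.foldl]
  have h0 : (PySem.Int.bxor (PySem.Int.bxor (PySem.Int.bxor (PySem.Int.bxor (PySem.Int.bxor (PySem.Int.bxor (PySem.Int.bxor (PySem.Int.bxor (PySem.Int.bxor z0 z1) z2) z3) z4) z5) z6) z7) z1) z4) = (PySem.Int.bxor (PySem.Int.bxor (PySem.Int.bxor (PySem.Int.bxor (PySem.Int.bxor z0 z2) z3) z5) z6) z7) := by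
    simp only [bxor_assoc, bxor_left_comm, PySem.Int.bxor_comm, bxor_cancel_left, PySem.Int.bxor_self, PySem.Int.bxor_zero]
  have h1 : (PySem.Int.bxor (PySem.Int.bxor (PySem.Int.bxor (PySem.Int.bxor (PySem.Int.bxor (PySem.Int.bxor (PySem.Int.bxor (PySem.Int.bxor (PySem.Int.bxor z0 z1) z2) z3) z4) z5) z6) z7) z2) z5) = (PySem.Int.bxor (PySem.Int.bxor (PySem.Int.bxor (PySem.Int.bxor (PySem.Int.bxor z0 z1) z3) z4) z6) z7) := by
    simp only [bxor_assoc, bxor_left_comm, PySem.Int.bxor_comm, bxor_cancel_left, PySem.Int.bxor_self, PySem.Int.bxor_zero]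
  have h2 : (PySem.Int.bxor (PySem.Int.bxor (PySem.Int.bxor (PySem.Int.bxor (PySem.Int.bxor (PySem.Int.bxor (PySem.Int.bxor (PySem.Int.bxor (PySem.Int.bxor z0 z1) z2) z3) z4) z5) z6) z7) z3) z6) = (PySem.Int.bxor (PySem.Int.bxor (PySem.Int.bxor (PySem.Int.bxor (PySem.Int.bxor z0 z1) z2) z4) z5) z7) := by
    simp only [bxor_assoc, bxor_left_comm, PySem.Int.bxor_comm, bxor_cancel_left, PySem.Int.bxor_self, PySem.Int.bxor_zero]
  have h3 : (PySem.Int.bxor (PySem.Int.bxor (PySem.Int.bxor (PySem.Int.bxor (PySem.Int.bxor (PySem.Int.bxor (PySem.Int.bxor (PySem.Int.bxor (PySem.Int.bxor z0 z1) z2) z3) z4) z5) z6) z7) z0) z7) = (PySem.Int.bxor (PySem.Int.bxor (PySem.Int.bxor (PySem.Int.bxor (PySem.Int.bxor z1 z2) z3) z4) z5) z6) := by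
    simp only [bxor_assoc, bxor_left_comm, PySem.Int.bxor_comm, bxor_cancel_left, PySem.Int.bxor_self, PySem.Int.bxor_zero]
  have h4 : (PySem.Int.bxor (PySem.Int.bxor (PySem.Int.bxor (PySem.Int.bxor (PySem.Int.bxor (PySem.Int.bxor (PySem.Int.bxor (PySem.Int.bxor (PySem.Int.bxor (PySem.Int.bxor z0 z1) z2) z3) z4) z5) z6) z7) z2) z3) z4) = (PySem.Int.bxor (PySem.Int.bxor (PySem.Int.bxor (PySem.Int.bxor z0 z1) z5) z6) z7) := by
    simp only [bxor_assoc, bxor_left_comm, PySem.Int.bxor_comm, bxor_cancel_left, PySem.Int.bxor_self, PySem.Int.bxor_zero]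
  have h5 : (PySem.Int.bxor (PySem.Int.bxor (PySem.Int.bxor (PySem.Int.bxor (PySem.Int.bxor (PySem.Int.bxor (PySem.Int.bxor (PySem.Int.bxor (PySem.Int.bxor (PySem.Int.bxor z0 z1) z2) z3) z4) z5) z6) z7) z0) z3) z5) = (PySem.Int.bxor (PySem.Int.bxor (PySem.Int.bxor (PySem.Int.bxor z1 z2) z4) z6) z7) := by
    simp only [bxor_assoc, bxor_left_comm, PySem.Int.bxor_comm, bxor_cancel_left, PySem.Int.bxor_self, PySem.Int.bxor_zero]
  have h6 : (PySem.Int.bxor (PySem.Int.bxor (PySem.Int.bxor (PySem.Int.bxor (PySem.Int.bxor (PySem.Int.bxor (PySem.Int.bxor (PySem.Int.bxor (PySem.Int.bxor (PySem.Int.bxor z0 z1) z2) z3) z4) z5) z6) z7) z0) z1) z6) = (PySem.Int.bxor (PySem.Int.bxor (PySem.Int.bxor (PySem.Int.bxor z2 z3) z4) z5) z7) := by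
    simp only [bxor_assoc, bxor_left_comm, PySem.Int.bxor_comm, bxor_cancel_left, PySem.Int.bxor_self, PySem.Int.bxor_zero]
  have h7 : (PySem.Int.bxor (PySem.Int.bxor (PySem.Int.bxor (PySem.Int.bxor (PySem.Int.bxor (PySem.Int.bxor (PySem.Int.bxor (PySem.Int.bxor (PySem.Int.bxor (PySem.Int.bxor z0 z1) z2) z3) z4) z5) z6) z7) z1) z2) z7) = (PySem.Int.bxor (PySem.Int.bxor (PySem.Int.bxor (PySem.Int.bxor z0 z3) z4) z5) z6) := by
    simp only [bxor_assoc, bxor_left_comm, PySem.Int.bxor_comm, bxor_cancel_left, PySem.Int.bxor_self, PySem.Int.bxor_zero]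
  rw [h0, h1, h2, h3, h4, h5, h6, h7]
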